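-- pv_equiv track=rewrite | github.com/looloolalaa/Python-Challenge | PRO_모의고사.py | solution
-- ===== SOURCE A (Python) =====
-- def solution(answers):
--     scores = [0, 0, 0]
--
--     pattern1 = [1, 2, 3, 4, 5]
--     pattern2 = [2, 1, 2, 3, 2, 4, 2, 5]
--     pattern3 = [3, 3, 1, 1, 2, 2, 4, 4, 5, 5]
--
--     for i, a in enumerate(answers):
--         if a == pattern1[i % len(pattern1)]:
--             scores[0] += 1
--         if a == pattern2[i % len(pattern2)]:
--             scores[1] += 1
--         if a == pattern3[i % len(pattern3)]:
--             scores[2] += 1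
--
--     max_score = max(scores)
--
--     return [i + 1 for i, s in enumerate(scores) if s == max_score]
-- ===== SOURCE B (Python) =====
-- def solution(answers):
--     patterns = [[1, 2, 3, 4, 5],
--                 [2, 1, 2, 3, 2, 4, 2, 5],
--                 [3, 3, 1, 1, 2, 2, 4, 4, 5, 5]]
--     # Per pattern-position strided counting: answers[j::len(p)] are exactly the
--     # answers compared against p[j], so its .count(v) tallies them in one shot.
--     scores = [sum(answers[j::len(p)].count(v) for j, v in enumerate(p))
--               for p in patterns]
--     best = max(scores)
--     return [i + 1 for i, s in enumerate(scores) if s == best]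
-- ===== Notes on version B (the rewrite author's own statement) =====
-- stated objective: alternative
-- what changed: Replaces A's single per-answer Python loop (three counters, a modulo-indexed pattern lookup per counter per element) with per-pattern-position strided counting: for each position j of each pattern, answers[j::len(p)].count(p[j]) tallies that position's matches in one C-level slice-and-count, summed per pattern; then max and filter as before.
import Mathlib
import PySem

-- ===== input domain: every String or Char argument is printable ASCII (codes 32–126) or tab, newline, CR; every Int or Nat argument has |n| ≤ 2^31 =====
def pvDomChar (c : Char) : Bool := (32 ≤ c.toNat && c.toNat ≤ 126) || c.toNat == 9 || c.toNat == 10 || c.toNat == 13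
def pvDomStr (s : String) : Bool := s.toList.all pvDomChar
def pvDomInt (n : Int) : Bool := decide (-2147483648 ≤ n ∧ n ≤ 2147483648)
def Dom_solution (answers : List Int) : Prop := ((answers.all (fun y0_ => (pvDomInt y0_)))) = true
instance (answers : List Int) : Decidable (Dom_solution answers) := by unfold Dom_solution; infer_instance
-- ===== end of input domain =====

-- B replaces A's single per-answer loop (three counters, one modulo test per pattern
-- and element) with per-pattern-position strided counting: for each position j of a
-- pattern p, answers[j::len(p)] are exactly the answers compared against p[j], so
-- .count(p[j]) tallies that position's matches. Objective: alternative decomposition.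

-- the three fixed answer patterns (shared data constants)
def pat1 : List Int := [1, 2, 3, 4, 5]
def pat2 : List Int := [2, 1, 2, 3, 2, 4, 2, 5]
def pat3 : List Int := [3, 3, 1, 1, 2, 2, 4, 4, 5, 5]

-- ===== PORT A =====
-- literal transliteration: one fold over enumerate(answers) with three counters,
-- then max (the scores list is a nonempty literal, so Python's max never raises
-- and .getD 0 is exact) and the comprehension.
def solution (answers : List Int) : List Int :=
  let scores :=
    (PySem.List.enumerate answers).foldl
      (fun (s : Int × Int × Int) (ia : Int × Int) =>
        let s1 := if ia.2 = PySem.List.pyGetD pat1 (PySem.Int.mod ia.1 (pat1.length : Int)) 0 then s.1 + 1 else s.1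
        let s2 := if ia.2 = PySem.List.pyGetD pat2 (PySem.Int.mod ia.1 (pat2.length : Int)) 0 then s.2.1 + 1 else s.2.1
        let s3 := if ia.2 = PySem.List.pyGetD pat3 (PySem.Int.mod ia.1 (pat3.length : Int)) 0 then s.2.2 + 1 else s.2.2
        (s1, s2, s3))
      (0, 0, 0)
  let scoresL : List Int := [scores.1, scores.2.1, scores.2.2]
  let maxScore := (PySem.List.max? scoresL (fun x => x)).getD 0
  (PySem.List.enumerate scoresL).filterMap
    (fun p => if p.2 = maxScore then some (p.1 + 1) else none)

-- ===== PORT B =====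
-- hand port of the strided slice answers[j::L] (exact for 0 ≤ j and 1 ≤ L,
-- which is how B uses it: j comes from enumerate(p), L = len(p) ∈ {5,8,10})
def strideFrom : List Int → Nat → Nat → List Int
  | [], _, _ => []
  | a :: t, 0, L => a :: strideFrom t (L - 1) L
  | _ :: t, j + 1, L => strideFrom t j L

-- sum(answers[j::len(p)].count(v) for j, v in enumerate(p)); the enumerate
-- index is a nonnegative Int, so .toNat is exact
def patScore (answers p : List Int) : Int :=
  ((PySem.List.enumerate p).map
    (fun jv => (PySem.List.count (strideFrom answers jv.1.toNat p.length) jv.2 : Int))).sum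

def solution_alt (answers : List Int) : List Int :=
  let scores := [pat1, pat2, pat3].map (patScore answers)
  let best := (PySem.List.max? scores (fun x => x)).getD 0
  (PySem.List.enumerate scores).filterMap
    (fun p => if p.2 = best then some (p.1 + 1) else none)

-- ===== PRECONDITION & SPEC =====
def Spec_solution (answers : List Int) (out : List Int) : Prop := out = solution_alt answers
instance (answers : List Int) (out : List Int) : Decidable (Spec_solution answers out) := by unfold Spec_solution; infer_instance

-- ===== CLAIM (what is proved, stated in full; the proofs are below) =====
def Claim_equal_solution : Prop := ∀ (answers : List Int), Dom_solution answers → Spec_solution answers (solution answers)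

-- ===== LEMMAS AND PROOFS =====

-- common reference point for both proofs: one cyclic pass over the answers,
-- rotating the pattern one step per answer
def cyc : List Int → List Int → Int
  | [], _ => 0
  | a :: t, q => (if a = q.getD 0 0 then (1 : Int) else 0) + cyc t (q.drop 1 ++ q.take 1)

-- rotation of the pattern by k positions
def rotN (q : List Int) (k : Nat) : List Int := q.drop k ++ q.take k

lemma rotN_zero (q : List Int) : rotN q 0 = q := by simp [rotN]

lemma getD_rotN_zero (q : List Int) (k : Nat) (hk : k < q.length) :
    (rotN q k).getD 0 0 = q.getD k 0 := by
  have hne : q.drop k ≠ [] := by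
    intro h; have := congrArg List.length h; simp at this; omega
  obtain ⟨a, t, ht⟩ := List.exists_cons_of_ne_nil hne
  have hk' : q[k]? = some a := by
    have := congrArg (fun l => l[0]?) ht
    simpa [List.getElem?_drop] using this
  simp [rotN, ht, List.getD, hk']

lemma rot_rotN (q : List Int) (k : Nat) (hk : k < q.length) :
    (rotN q k).drop 1 ++ (rotN q k).take 1 = rotN q ((k + 1) % q.length) := by
  have hne : q.drop k ≠ [] := by
    intro h; have := congrArg List.length h; simp at this; omega
  obtain ⟨a, t, ht⟩ := List.exists_cons_of_ne_nil hne
  have ha : q.drop (k + 1) = t := by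
    have := congrArg (List.drop 1) ht
    simpa [List.drop_drop] using this
  have hak : a = q[k] := by
    have h0 : (q.drop k)[0]'(by simp [ht]) = a := by simp [ht]
    simpa using h0.symm
  have htake : q.take (k + 1) = q.take k ++ [a] := by
    rw [hak]; exact List.take_succ_eq_append_getElem hk
  by_cases h : k + 1 = q.length
  · have hm : (k + 1) % q.length = 0 := by rw [h, Nat.mod_self]
    have hd : q.drop (k + 1) = [] := by
      apply List.eq_nil_of_length_eq_zero; simp; omega
    have ht0 : t = [] := by rwa [ha] at hd
    rw [hm, rotN_zero]
    have hr : rotN q k = a :: q.take k := by simp [rotN, ht, ht0]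
    rw [hr]
    simp only [List.drop_succ_cons, List.drop_zero, List.take_succ_cons, List.take_zero]
    rw [← htake, h, List.take_length]
  · have hm : (k + 1) % q.length = k + 1 := Nat.mod_eq_of_lt (by omega)
    rw [hm]
    simp [rotN, ht, ha, htake]

-- A's per-pattern counting fold, from an arbitrary start index, computes cyc
-- of the correspondingly rotated pattern
lemma foldA_eq_cyc (p : List Int) (hp : p ≠ []) (xs : List Int) (i : Nat) (s : Int) :
    (PySem.List.enumerate xs (i : Int)).foldl
      (fun acc ia =>
        if ia.2 = PySem.List.pyGetD p (PySem.Int.mod ia.1 (p.length : Int)) 0 then acc + 1 else acc)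
      s = s + cyc xs (rotN p (i % p.length)) := by
  induction xs generalizing i s with
  | nil => simp [PySem.List.enumerate_nil, cyc]
  | cons a t ih =>
    have hL : 0 < p.length := List.length_pos_iff.mpr hp
    rw [PySem.List.enumerate_cons, List.foldl_cons]
    have hcast : (i : Int) + 1 = ((i + 1 : Nat) : Int) := by push_cast; ring
    rw [hcast, ih (i + 1)]
    have hidx : PySem.List.pyGetD p (PySem.Int.mod (i : Int) (p.length : Int)) 0
        = (rotN p (i % p.length)).getD 0 0 := by
      rw [PySem.Int.mod_natCast, PySem.List.pyGetD_natCast,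
        getD_rotN_zero p _ (Nat.mod_lt _ hL)]
    have hrot : rotN p ((i + 1) % p.length)
        = (rotN p (i % p.length)).drop 1 ++ (rotN p (i % p.length)).take 1 := by
      rw [rot_rotN p (i % p.length) (Nat.mod_lt _ hL)]
      congr 1
      simp [Nat.add_mod]
    show (if a = _ then s + 1 else s) + cyc t (rotN p ((i + 1) % p.length))
        = s + cyc (a :: t) (rotN p (i % p.length))
    rw [hrot]
    show _ = s + ((if a = (rotN p (i % p.length)).getD 0 0 then (1:Int) else 0) + cyc t _)
    rw [hidx]
    split_ifs <;> ring

-- B's enumerate-indexed sum rewritten as a range-indexed sum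
lemma patScore_enum_range (xs : List Int) (L : Nat) (q : List Int) (s : Nat) :
    ((PySem.List.enumerate q (s : Int)).map
      (fun jv => (PySem.List.count (strideFrom xs jv.1.toNat L) jv.2 : Int))).sum
    = ((List.range q.length).map
        (fun j => (PySem.List.count (strideFrom xs (s + j) L) (q.getD j 0) : Int))).sum := by
  induction q generalizing s with
  | nil => simp [PySem.List.enumerate_nil]
  | cons v q' ih =>
    rw [PySem.List.enumerate_cons, List.map_cons, List.sum_cons]
    have hcast : (s : Int) + 1 = ((s + 1 : Nat) : Int) := by push_cast; ring
    rw [hcast, ih (s + 1)]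
    simp only [List.length_cons]
    rw [List.range_succ_eq_map, List.map_cons, List.sum_cons, List.map_map]
    have hfun : ((List.range q'.length).map
        ((fun j => (PySem.List.count (strideFrom xs (s + j) L) ((v :: q').getD j 0) : Int)) ∘ Nat.succ)).sum
        = ((List.range q'.length).map
          (fun j => (PySem.List.count (strideFrom xs (s + 1 + j) L) (q'.getD j 0) : Int))).sum := by
      apply congrArg
      apply List.map_congr_left
      intro j _
      simp only [Function.comp_def, List.getD_cons_succ]
      rw [show s + (j + 1) = s + 1 + j by omega]
    rw [hfun]
    simp

-- B's per-position strided counts sum to the same cyclic pass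
lemma strided_eq_cyc (xs : List Int) : ∀ (q : List Int), q ≠ [] →
    ((List.range q.length).map
      (fun j => (PySem.List.count (strideFrom xs j q.length) (q.getD j 0) : Int))).sum
    = cyc xs q := by
  induction xs with
  | nil =>
    intro q hq
    have hstr : ∀ j L, strideFrom [] j L = [] := fun j L => by cases j <;> rfl
    have hcyc : cyc [] q = 0 := rfl
    simp [hcyc, hstr, PySem.List.count_eq]
  | cons a t ih =>
    intro q hq
    obtain ⟨h, tq, rfl⟩ := List.exists_cons_of_ne_nil hq
    have hlen : (h :: tq).length = tq.length + 1 := rfl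
    rw [hlen, List.range_succ_eq_map, List.map_cons, List.sum_cons, List.map_map]
    have hcyc : cyc (a :: t) (h :: tq)
        = (if a = h then (1:Int) else 0) + cyc t (tq ++ [h]) := by
      simp [cyc]
    rw [hcyc]
    have ihr := ih (tq ++ [h]) (by simp)
    have hlen2 : (tq ++ [h]).length = tq.length + 1 := by simp
    rw [hlen2] at ihr
    rw [← ihr, List.range_succ, List.map_append, List.sum_append]
    -- head term: strideFrom (a::t) 0 L = a :: strideFrom t (L-1) L, and L-1 = tq.length
    have hhead : strideFrom (a :: t) 0 (tq.length + 1) = a :: strideFrom t tq.length (tq.length + 1) := rfl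
    have hcount : (PySem.List.count (a :: strideFrom t tq.length (tq.length + 1)) h : Int)
        = (if a = h then (1:Int) else 0) + (PySem.List.count (strideFrom t tq.length (tq.length + 1)) h : Int) := by
      simp only [PySem.List.count_eq, List.count_cons, beq_iff_eq]
      split_ifs with hah <;> push_cast <;> ring
    have htail : ((List.range tq.length).map
          ((fun j => (PySem.List.count (strideFrom (a :: t) j (tq.length + 1)) ((h :: tq).getD j 0) : Int)) ∘ Nat.succ)).sum
        = ((List.range tq.length).map
          (fun j => (PySem.List.count (strideFrom t j (tq.length + 1)) ((tq ++ [h]).getD j 0) : Int))).sum := by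
      apply congrArg
      apply List.map_congr_left
      intro j hj
      have hjlt : j < tq.length := List.mem_range.mp hj
      have h1 : strideFrom (a :: t) (j + 1) (tq.length + 1) = strideFrom t j (tq.length + 1) := rfl
      have h2 : (h :: tq).getD (j + 1) 0 = tq.getD j 0 := rfl
      have h3 : (tq ++ [h]).getD j 0 = tq.getD j 0 := by
        simp [List.getD, List.getElem?_append_left hjlt]
      simp only [Function.comp_def]
      rw [h1, h2, h3]
    have hlast : ([tq.length].map
          (fun j => (PySem.List.count (strideFrom t j (tq.length + 1)) ((tq ++ [h]).getD j 0) : Int))).sum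
        = (PySem.List.count (strideFrom t tq.length (tq.length + 1)) h : Int) := by
      simp [List.getD]
    rw [hhead] at *
    simp only [List.getD_cons_zero]
    rw [htail, hcount, hlast]
    ring

-- the three scores of A equal the three scores of B
lemma scores_eq (xs : List Int) (p : List Int) (hp : p ≠ []) :
    patScore xs p = cyc xs p := by
  unfold patScore
  have h0 : ((0 : Nat) : Int) = (0 : Int) := rfl
  rw [← h0, patScore_enum_range xs p.length p 0]
  simp only [Nat.zero_add]
  exact strided_eq_cyc xs p hp

-- A's triple-accumulator fold splits into three independent folds
-- (PySem.List.foldl_prod_mk) and each computes cyc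
lemma foldA_triple (xs : List Int) :
    (PySem.List.enumerate xs).foldl
      (fun (s : Int × Int × Int) (ia : Int × Int) =>
        (if ia.2 = PySem.List.pyGetD pat1 (PySem.Int.mod ia.1 (pat1.length : Int)) 0 then s.1 + 1 else s.1,
         if ia.2 = PySem.List.pyGetD pat2 (PySem.Int.mod ia.1 (pat2.length : Int)) 0 then s.2.1 + 1 else s.2.1,
         if ia.2 = PySem.List.pyGetD pat3 (PySem.Int.mod ia.1 (pat3.length : Int)) 0 then s.2.2 + 1 else s.2.2))
      (0, 0, 0)
    = (cyc xs pat1, cyc xs pat2, cyc xs pat3) := by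
  rw [PySem.List.foldl_prod_mk
        (f := fun acc (ia : Int × Int) => if ia.2 = PySem.List.pyGetD pat1 (PySem.Int.mod ia.1 (pat1.length : Int)) 0 then acc + 1 else acc)
        (g := fun (s : Int × Int) (ia : Int × Int) =>
          (if ia.2 = PySem.List.pyGetD pat2 (PySem.Int.mod ia.1 (pat2.length : Int)) 0 then s.1 + 1 else s.1,
           if ia.2 = PySem.List.pyGetD pat3 (PySem.Int.mod ia.1 (pat3.length : Int)) 0 then s.2 + 1 else s.2)),
      PySem.List.foldl_prod_mk
        (f := fun acc (ia : Int × Int) => if ia.2 = PySem.List.pyGetD pat2 (PySem.Int.mod ia.1 (pat2.length : Int)) 0 then acc + 1 else acc)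
        (g := fun acc (ia : Int × Int) => if ia.2 = PySem.List.pyGetD pat3 (PySem.Int.mod ia.1 (pat3.length : Int)) 0 then acc + 1 else acc)]
  have e1 := foldA_eq_cyc pat1 (by simp [pat1]) xs 0 0
  have e2 := foldA_eq_cyc pat2 (by simp [pat2]) xs 0 0
  have e3 := foldA_eq_cyc pat3 (by simp [pat3]) xs 0 0
  simp only [Nat.cast_zero, Nat.zero_mod, rotN_zero, zero_add] at e1 e2 e3
  rw [e1, e2, e3]

-- ===== VERDICT (by name: the statement is the Claim_ definition above) =====
theorem solution_spec : Claim_equal_solution := by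
  intro answers _
  unfold Spec_solution solution solution_alt
  simp only [List.map_cons, List.map_nil]
  have b1 : patScore answers pat1 = cyc answers pat1 := scores_eq answers pat1 (by simp [pat1])
  have b2 : patScore answers pat2 = cyc answers pat2 := scores_eq answers pat2 (by simp [pat2])
  have b3 : patScore answers pat3 = cyc answers pat3 := scores_eq answers pat3 (by simp [pat3])
  simp only [b1, b2, b3, foldA_triple]
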